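-- pv_equiv track=rewrite | github.com/Tako64tako/competitive-programming | 299/c.py | max_dango_level
-- ===== SOURCE A (Python) =====
-- def max_dango_level(S):
--     N = len(S)
--     max_level = 0
--
--     for i in range(N):
--         for j in range(i+1, N+1):
--             sub_string = S[i:j]
--             if sub_string[0] == '-' and sub_string[-1] == 'o' or sub_string[0] == 'o' and sub_string[-1] == '-':
--                 if sub_string.count('o') == len(sub_string) - 1:
--                     level = len(sub_string) - 1
--                     max_level = max(max_level, level)
--
--     return max_level if max_level > 0 else -1
-- ===== SOURCE B (Python) =====
-- def max_dango_level(S):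
--     # One left-to-right scan: track the length of the current run of 'o'
--     # and whether the character just before that run was '-'; a run bordered
--     # by a '-' on either side is a dango of level = run length.
--     best = 0
--     run = 0
--     prev_dash = False
--     for c in S:
--         if c == 'o':
--             run += 1
--         else:
--             if (c == '-' or prev_dash) and run > 0:
--                 best = max(best, run)
--             prev_dash = (c == '-')
--             run = 0
--     if prev_dash and run > 0:
--         best = max(best, run)
--     return best if best > 0 else -1
-- ===== Notes on version B (the rewrite author's own statement) =====
-- stated objective: faster
-- what changed: A enumerates all O(N^2) substrings and re-counts the o characters in each (O(N^3) total); B does one left-to-right scan tracking the length of the current run of o characters and whether a dash precedes it, closing a candidate level whenever the run ends at a dash or started after one.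
import Mathlib
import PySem

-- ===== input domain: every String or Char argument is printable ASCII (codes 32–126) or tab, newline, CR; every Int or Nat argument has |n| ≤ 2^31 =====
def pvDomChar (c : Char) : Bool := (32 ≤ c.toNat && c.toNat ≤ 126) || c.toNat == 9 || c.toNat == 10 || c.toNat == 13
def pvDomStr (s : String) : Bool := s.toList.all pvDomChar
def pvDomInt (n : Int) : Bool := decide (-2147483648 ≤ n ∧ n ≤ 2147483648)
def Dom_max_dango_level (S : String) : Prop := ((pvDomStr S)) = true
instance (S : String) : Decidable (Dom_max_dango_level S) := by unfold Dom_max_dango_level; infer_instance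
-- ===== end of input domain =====

-- B replaces A's scan over all O(N^2) substrings (each re-counted with count) by one
-- left-to-right pass tracking the current run of o characters and whether a dash precedes it.

-- ===== PORT A =====
-- body of A's inner loop applied to sub = S[i:j]: the two end-character tests and the
-- count test (sub.count('o') with a single-character needle is exactly List.count)
def pvSubCheck (acc2 : Int) (sub : List Char) : Int :=
  if (PySem.List.pyGet? sub 0 = some '-' ∧ PySem.List.pyGet? sub (-1) = some 'o') ∨
     (PySem.List.pyGet? sub 0 = some 'o' ∧ PySem.List.pyGet? sub (-1) = some '-') then
    if (PySem.List.count sub 'o' : Int) = (sub.length : Int) - 1 then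
      max acc2 ((sub.length : Int) - 1)
    else acc2
  else acc2

def pvInnerStep (l : List Char) (i : Int) (acc2 : Int) (j : Int) : Int :=
  pvSubCheck acc2 (PySem.List.slice l (some i) (some j))

-- A's inner loop: for j in range(i+1, N+1)
def pvOuterStep (l : List Char) (N : Int) (acc : Int) (i : Int) : Int :=
  (PySem.List.pyRange (i + 1) (N + 1) 1).foldl (pvInnerStep l i) acc

def max_dango_level (S : String) : Int :=
  let l := S.toList
  let N : Int := (l.length : Int)
  let m := (PySem.List.pyRange 0 N 1).foldl (pvOuterStep l N) 0
  if m > 0 then m else -1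

-- ===== PORT B =====
-- one step of B's scan; state = (best, run, prev_dash)
def pvScanStep (st : Int × Int × Bool) (c : Char) : Int × Int × Bool :=
  if c = 'o' then (st.1, st.2.1 + 1, st.2.2)
  else (if (c = '-' ∨ st.2.2 = true) ∧ 0 < st.2.1 then max st.1 st.2.1 else st.1, 0, c == '-')

def max_dango_level_alt (S : String) : Int :=
  let st := S.toList.foldl pvScanStep (0, 0, false)
  let best := if st.2.2 = true ∧ 0 < st.2.1 then max st.1 st.2.1 else st.1
  if best > 0 then best else -1

-- ===== PRECONDITION & SPEC =====
def Spec_max_dango_level (S : String) (out : Int) : Prop := out = max_dango_level_alt S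
instance (S : String) (out : Int) : Decidable (Spec_max_dango_level S out) := by unfold Spec_max_dango_level; infer_instance

-- ===== CLAIM (what is proved, stated in full; the proofs are below) =====
def Claim_equal_max_dango_level : Prop := ∀ (S : String), Dom_max_dango_level S → Spec_max_dango_level S (max_dango_level S)

-- ===== LEMMAS AND PROOFS =====

-- `pvP l k`: some dango of level k (a '-' followed by k 'o's, or k 'o's followed by '-')
-- occurs in l as a contiguous substring; this is A's qualifying-substring condition.
def pvP (l : List Char) (k : Int) : Prop :=
  ∃ n : Nat, k = (n : Int) + 1 ∧
    (('-' :: List.replicate (n + 1) 'o') <:+: l ∨ (List.replicate (n + 1) 'o' ++ ['-']) <:+: l)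

lemma pvPat1Concat (n : Nat) :
    ('-' :: List.replicate (n + 1) 'o') = ('-' :: List.replicate n 'o') ++ ['o'] := by
  rw [List.replicate_succ']; rfl

-- `pvGood l m`: m is the maximum of 0 and all levels occurring in l
def pvGood (l : List Char) (m : Int) : Prop :=
  0 ≤ m ∧ (0 < m → pvP l m) ∧ (∀ k, pvP l k → k ≤ m)

lemma pvGood_unique (l : List Char) (m1 m2 : Int)
    (h1 : pvGood l m1) (h2 : pvGood l m2) : m1 = m2 := by
  obtain ⟨h10, h1s, h1c⟩ := h1
  obtain ⟨h20, h2s, h2c⟩ := h2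
  rcases lt_trichotomy m1 m2 with h | h | h
  · have := h1c m2 (h2s (lt_of_le_of_lt h10 h)); omega
  · exact h
  · have := h2c m1 (h1s (lt_of_le_of_lt h20 h)); omega

-- generic lemmas about folds whose step can only increase the accumulator
lemma pvFoldGe {α : Type} (f : Int → α → Int) (L : List α)
    (h : ∀ a x, x ∈ L → a ≤ f a x) : ∀ init : Int, init ≤ L.foldl f init := by
  induction L with
  | nil => intro init; simp
  | cons y L ih =>
    intro init
    have h1 : init ≤ f init y := h init y (by simp)
    have h2 := ih (fun a x hx => h a x (by simp [hx])) (f init y)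
    simpa using le_trans h1 h2

lemma pvFoldCand {α : Type} (f : Int → α → Int) (L : List α) (v : Int) (x : α)
    (hx : x ∈ L) (hmono : ∀ a y, y ∈ L → a ≤ f a y) (hv : ∀ a, v ≤ f a x) :
    ∀ init : Int, v ≤ L.foldl f init := by
  induction L with
  | nil => cases hx
  | cons y L ih =>
    intro init
    rcases List.mem_cons.mp hx with rfl | hx'
    · have := pvFoldGe f L (fun a z hz => hmono a z (by simp [hz])) (f init x)
      simpa using le_trans (hv init) this
    · exact ih hx' (fun a z hz => hmono a z (by simp [hz])) (f init y)

lemma pvFoldSound {α : Type} (f : Int → α → Int) (C : Int → Prop) (L : List α)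
    (h : ∀ a x, x ∈ L → (f a x = a ∨ C (f a x))) :
    ∀ init : Int, L.foldl f init = init ∨ C (L.foldl f init) := by
  induction L with
  | nil => intro init; left; rfl
  | cons y L ih =>
    intro init
    have step := h init y (by simp)
    have rest := ih (fun a x hx => h a x (by simp [hx])) (f init y)
    rcases rest with hr | hr
    · rcases step with hs | hs
      · left; simpa [hr] using hs
      · right; simpa [hr] using hs
    · right; simpa using hr

-- ---------- A side ----------

lemma pvSliceInfix (l : List Char) (a b : Nat) : (l.drop a).take b <:+: l :=
  ((List.take_prefix _ _).isInfix).trans (List.drop_suffix a l).isInfix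

lemma pvShape1 (sub : List Char)
    (hh : sub.head? = some '-') (hl : sub.getLast? = some 'o')
    (hc : sub.count 'o' = sub.length - 1) :
    ∃ n : Nat, sub = '-' :: List.replicate (n + 1) 'o' := by
  cases sub with
  | nil => simp at hh
  | cons x t =>
    simp only [List.head?_cons, Option.some.injEq] at hh
    subst hh
    have ht : t ≠ [] := by rintro rfl; simp at hl
    have hcount : t.count 'o' = t.length := by
      simp at hc
      simpa using hc
    have hall : ∀ b ∈ t, b = 'o' := fun b hb => (List.count_eq_length.mp hcount b hb).symm
    have hrep : t = List.replicate t.length 'o' := List.eq_replicate_length.mpr hall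
    obtain ⟨n, hn⟩ : ∃ n, t.length = n + 1 :=
      ⟨t.length - 1, by have := List.length_pos_iff.mpr ht; omega⟩
    exact ⟨n, by rw [hrep, hn]⟩

lemma pvShape2 (sub : List Char)
    (hh : sub.head? = some 'o') (hl : sub.getLast? = some '-')
    (hc : sub.count 'o' = sub.length - 1) :
    ∃ n : Nat, sub = List.replicate (n + 1) 'o' ++ ['-'] := by
  rcases List.eq_nil_or_concat sub with rfl | ⟨ys, z, rfl⟩
  · simp at hh
  · have hz : z = '-' := by simpa [List.getLast?_concat] using hl
    subst hz
    have hys : ys ≠ [] := by rintro rfl; simp at hh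
    have hcount : ys.count 'o' = ys.length := by
      simp [List.count_append] at hc
      simpa using hc
    have hall : ∀ b ∈ ys, b = 'o' := fun b hb => (List.count_eq_length.mp hcount b hb).symm
    have hrep : ys = List.replicate ys.length 'o' := List.eq_replicate_length.mpr hall
    obtain ⟨n, hn⟩ : ∃ n, ys.length = n + 1 :=
      ⟨ys.length - 1, by have := List.length_pos_iff.mpr hys; omega⟩
    exact ⟨n, by rw [hrep, hn]; simp [List.concat_eq_append]⟩

lemma pvSubCheckMono (a : Int) (sub : List Char) : a ≤ pvSubCheck a sub := by
  unfold pvSubCheck; split_ifs <;> simp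

lemma pvInnerMono (l : List Char) (i : Int) : ∀ (a j : Int), a ≤ pvInnerStep l i a j :=
  fun a j => pvSubCheckMono a _

lemma pvSubCheckSound (l : List Char) (a : Int) (sub : List Char) (hsub : sub <:+: l) :
    pvSubCheck a sub = a ∨ pvP l (pvSubCheck a sub) := by
  unfold pvSubCheck
  split_ifs with h1 h2
  · rcases le_total ((sub.length : Int) - 1) a with hle | hle
    · left; exact max_eq_left hle
    · right
      have hne : sub ≠ [] := by
        rintro rfl
        rcases h1 with ⟨ha, _⟩ | ⟨ha, _⟩ <;> simp [PySem.List.pyGet?] at ha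
      have hlen : 0 < sub.length := List.length_pos_iff.mpr hne
      have hcnt : List.count 'o' sub = sub.length - 1 := by
        have h3 := PySem.List.count_eq sub 'o'
        omega
      have hh0 : PySem.List.pyGet? sub 0 = sub.head? := by
        rw [PySem.List.pyGet?_zero, List.head?_eq_getElem?]
      have hmax : max a ((sub.length : Int) - 1) = (sub.length : Int) - 1 := max_eq_right hle
      rw [hmax]
      rcases h1 with ⟨ha, hb⟩ | ⟨ha, hb⟩
      · obtain ⟨n, rfl⟩ := pvShape1 sub (by rw [← hh0]; exact ha)
          (by rw [← PySem.List.pyGet?_neg_one]; exact hb) hcnt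
        refine ⟨n, ?_, Or.inl hsub⟩
        simp only [List.length_cons, List.length_replicate]
        push_cast; ring
      · obtain ⟨n, rfl⟩ := pvShape2 sub (by rw [← hh0]; exact ha)
          (by rw [← PySem.List.pyGet?_neg_one]; exact hb) hcnt
        refine ⟨n, ?_, Or.inr hsub⟩
        simp only [List.length_append, List.length_cons, List.length_replicate, List.length_nil]
        push_cast; ring
  · left; rfl
  · left; rfl

lemma pvInnerSound (l : List Char) (i j : Int) (h0 : 0 ≤ i) (hj0 : 0 ≤ j) :
    ∀ a : Int, pvInnerStep l i a j = a ∨ pvP l (pvInnerStep l i a j) := by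
  intro a
  unfold pvInnerStep
  apply pvSubCheckSound
  rw [PySem.List.slice_toNat l h0 hj0]
  exact pvSliceInfix l _ _

lemma pvOuterMono (l : List Char) (N : Int) : ∀ (a i : Int), a ≤ pvOuterStep l N a i := by
  intro a i
  exact pvFoldGe _ _ (fun a2 j _ => pvInnerMono l i a2 j) a

lemma pvASound (l : List Char) :
    (PySem.List.pyRange 0 (l.length : Int) 1).foldl (pvOuterStep l (l.length : Int)) 0 = 0 ∨
    pvP l ((PySem.List.pyRange 0 (l.length : Int) 1).foldl (pvOuterStep l (l.length : Int)) 0) := by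
  apply pvFoldSound
  intro a i hi
  have hi' := (PySem.List.mem_pyRange_one).mp hi
  show pvOuterStep l _ a i = a ∨ _
  unfold pvOuterStep
  refine pvFoldSound _ _ _ (fun a2 j2 hj => ?_) a
  have hj' := (PySem.List.mem_pyRange_one).mp hj
  exact pvInnerSound l i j2 hi'.1 (by omega) a2

lemma pvAVisit (l u pat w : List Char) (hl : u ++ pat ++ w = l) (hne : pat ≠ []) (v : Int)
    (hv : ∀ a2 : Int, v ≤ pvSubCheck a2 pat) :
    v ≤ (PySem.List.pyRange 0 (l.length : Int) 1).foldl (pvOuterStep l (l.length : Int)) 0 := by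
  have hlen : l.length = u.length + pat.length + w.length := by
    rw [← hl]; simp only [List.length_append]
  have hp0 : 0 < pat.length := List.length_pos_iff.mpr hne
  refine pvFoldCand _ _ v ((u.length : Int)) ?_ (fun a y _ => pvOuterMono l _ a y) ?_ 0
  · rw [PySem.List.mem_pyRange_one]; omega
  · intro a
    unfold pvOuterStep
    refine pvFoldCand _ _ v ((u.length : Int) + (pat.length : Int)) ?_
      (fun a2 y _ => pvInnerMono l _ a2 y) ?_ a
    · rw [PySem.List.mem_pyRange_one]; omega
    · intro a2
      have hs : PySem.List.slice l (some (u.length : Int))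
          (some ((u.length : Int) + (pat.length : Int))) = pat := by
        rw [PySem.List.slice_natCast_add l u.length pat.length, ← hl, List.append_assoc,
          List.drop_left, List.take_left' rfl]
      unfold pvInnerStep
      rw [hs]
      exact hv a2

lemma pvAComplete (l : List Char) (k : Int) (hk : pvP l k) :
    k ≤ (PySem.List.pyRange 0 (l.length : Int) 1).foldl (pvOuterStep l (l.length : Int)) 0 := by
  obtain ⟨n, rfl, hocc⟩ := hk
  rcases hocc with ⟨u, w, hl⟩ | ⟨u, w, hl⟩
  · refine pvAVisit l u _ w hl (by simp) _ (fun a2 => ?_)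
    have e1 : PySem.List.pyGet? ('-' :: List.replicate (n + 1) 'o') 0 = some '-' :=
      PySem.List.pyGet?_zero_cons _ _
    have e2 : PySem.List.pyGet? ('-' :: List.replicate (n + 1) 'o') (-1) = some 'o' := by
      rw [pvPat1Concat]; exact PySem.List.pyGet?_neg_one_append_singleton _ _
    have e3 : ((PySem.List.count ('-' :: List.replicate (n + 1) 'o') 'o' : Nat) : Int) =
        (('-' :: List.replicate (n + 1) 'o').length : Int) - 1 := by
      rw [PySem.List.count_eq]
      simp
    rw [pvSubCheck, if_pos (Or.inl ⟨e1, e2⟩), if_pos e3]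
    refine le_max_of_le_right ?_
    simp only [List.length_cons, List.length_replicate]
    push_cast; omega
  · refine pvAVisit l u _ w hl (by simp) _ (fun a2 => ?_)
    have e1 : PySem.List.pyGet? (List.replicate (n + 1) 'o' ++ ['-']) 0 = some 'o' := by
      rw [List.replicate_succ, List.cons_append]
      exact PySem.List.pyGet?_zero_cons _ _
    have e2 : PySem.List.pyGet? (List.replicate (n + 1) 'o' ++ ['-']) (-1) = some '-' :=
      PySem.List.pyGet?_neg_one_append_singleton _ _
    have e3 : ((PySem.List.count (List.replicate (n + 1) 'o' ++ ['-']) 'o' : Nat) : Int) =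
        ((List.replicate (n + 1) 'o' ++ ['-']).length : Int) - 1 := by
      rw [PySem.List.count_eq]
      simp [List.count_append]
    rw [pvSubCheck, if_pos (Or.inr ⟨e1, e2⟩), if_pos e3]
    refine le_max_of_le_right ?_
    simp only [List.length_append, List.length_cons, List.length_replicate, List.length_nil]
    push_cast; omega

lemma pvAGood (l : List Char) :
    pvGood l ((PySem.List.pyRange 0 (l.length : Int) 1).foldl (pvOuterStep l (l.length : Int)) 0) := by
  refine ⟨pvFoldGe _ _ (fun a i _ => pvOuterMono l _ a i) 0, fun hpos => ?_, fun k hk => pvAComplete l k hk⟩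
  rcases pvASound l with h | h
  · omega
  · exact h

-- ---------- B side ----------

def pvLeadO : List Char → Nat
  | [] => 0
  | c :: t => if c = 'o' then pvLeadO t + 1 else 0

def pvDashAfter : List Char → Bool
  | [] => false
  | c :: t => if c = 'o' then pvDashAfter t else c == '-'

def pvTrailO (p : List Char) : Nat := pvLeadO p.reverse
def pvDashBefore (p : List Char) : Bool := pvDashAfter p.reverse

def pvFin (st : Int × Int × Bool) : Int :=
  if st.2.2 = true ∧ 0 < st.2.1 then max st.1 st.2.1 else st.1

-- scan invariant over the processed prefix p
def pvInv (p : List Char) (st : Int × Int × Bool) : Prop :=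
  st.2.1 = (pvTrailO p : Int) ∧ st.2.2 = pvDashBefore p ∧ 0 ≤ st.1 ∧
  (0 < st.1 → pvP p st.1) ∧ pvGood p (pvFin st)

lemma pvTrailO_concat_o (p : List Char) : pvTrailO (p ++ ['o']) = pvTrailO p + 1 := by
  simp [pvTrailO, pvLeadO]

lemma pvTrailO_concat_ne (p : List Char) (c : Char) (h : c ≠ 'o') : pvTrailO (p ++ [c]) = 0 := by
  simp [pvTrailO, pvLeadO, h]

lemma pvDashBefore_concat_o (p : List Char) : pvDashBefore (p ++ ['o']) = pvDashBefore p := by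
  simp [pvDashBefore, pvDashAfter]

lemma pvDashBefore_concat_ne (p : List Char) (c : Char) (h : c ≠ 'o') :
    pvDashBefore (p ++ [c]) = (c == '-') := by
  simp [pvDashBefore, pvDashAfter, h]

lemma pvSuffixConcat (z p : List Char) (d c : Char) :
    (z ++ [d]) <:+ (p ++ [c]) ↔ d = c ∧ z <:+ p := by
  rw [← List.reverse_prefix]
  simp only [List.reverse_append, List.reverse_singleton, List.singleton_append]
  rw [List.cons_prefix_cons, List.reverse_prefix]

lemma pvL2rev (r : List Char) : List.replicate (pvLeadO r) 'o' <+: r := by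
  induction r with
  | nil => simp [pvLeadO]
  | cons c t ih =>
    by_cases h : c = 'o'
    · subst h
      have h2 : ('o' :: List.replicate (pvLeadO t) 'o') <+: ('o' :: t) :=
        List.cons_prefix_cons.mpr ⟨rfl, ih⟩
      simpa [pvLeadO, List.replicate_succ] using h2
    · simp [pvLeadO, h]

lemma pvL1rev (r : List Char) (h : pvDashAfter r = true) :
    (List.replicate (pvLeadO r) 'o' ++ ['-']) <+: r := by
  induction r with
  | nil => simp [pvDashAfter] at h
  | cons c t ih =>
    by_cases hc : c = 'o'
    · subst hc
      have h2 := ih (by simpa [pvDashAfter] using h)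
      have h3 : ('o' :: (List.replicate (pvLeadO t) 'o' ++ ['-'])) <+: ('o' :: t) :=
        List.cons_prefix_cons.mpr ⟨rfl, h2⟩
      simpa [pvLeadO, List.replicate_succ] using h3
    · have hcd : c = '-' := by simpa [pvDashAfter, hc] using h
      subst hcd
      simp [pvLeadO]

lemma pvL3rev (r : List Char) (k : Nat) (h : List.replicate k 'o' <+: r) : k ≤ pvLeadO r := by
  induction r generalizing k with
  | nil =>
    have := List.prefix_nil.mp h
    have : k = 0 := by simpa using congrArg List.length this
    omega
  | cons c t ih =>
    cases k with
    | zero => exact Nat.zero_le _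
    | succ k =>
      rw [List.replicate_succ, List.cons_prefix_cons] at h
      obtain ⟨hc, h2⟩ := h
      have := ih k h2
      simp [pvLeadO, ← hc]
      omega

lemma pvL4rev (r : List Char) (k : Nat) (h : (List.replicate k 'o' ++ ['-']) <+: r) :
    pvDashAfter r = true ∧ k = pvLeadO r := by
  induction r generalizing k with
  | nil =>
    have := List.prefix_nil.mp h
    simp at this
  | cons c t ih =>
    cases k with
    | zero =>
      simp only [List.replicate_zero, List.nil_append, List.cons_prefix_cons] at h
      obtain ⟨hc, _⟩ := h
      constructor <;> simp [pvDashAfter, pvLeadO, ← hc]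
    | succ k =>
      rw [List.replicate_succ, List.cons_append, List.cons_prefix_cons] at h
      obtain ⟨hc, h2⟩ := h
      obtain ⟨ha, hb⟩ := ih k h2
      constructor <;> simp [pvDashAfter, pvLeadO, ← hc, ha, hb]

lemma pvL1 (p : List Char) (h : pvDashBefore p = true) :
    ('-' :: List.replicate (pvTrailO p) 'o') <:+ p := by
  rw [← List.reverse_prefix]
  simpa [List.reverse_replicate] using pvL1rev p.reverse h

lemma pvL2 (p : List Char) : List.replicate (pvTrailO p) 'o' <:+ p := by
  rw [← List.reverse_prefix]
  simpa [List.reverse_replicate] using pvL2rev p.reverse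

lemma pvL3 (p : List Char) (k : Nat) (h : List.replicate k 'o' <:+ p) : k ≤ pvTrailO p := by
  apply pvL3rev
  have := List.reverse_prefix.mpr h
  simpa [List.reverse_replicate] using this

lemma pvL4 (p : List Char) (k : Nat) (h : ('-' :: List.replicate k 'o') <:+ p) :
    pvDashBefore p = true ∧ k = pvTrailO p := by
  have := List.reverse_prefix.mpr h
  exact pvL4rev p.reverse k (by simpa [List.reverse_replicate] using this)

lemma pvPMono (p : List Char) (c : Char) (k : Int) (h : pvP p k) : pvP (p ++ [c]) k := by
  obtain ⟨n, hn, hocc⟩ := h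
  have happ : p <:+: p ++ [c] := ⟨[], [c], by simp⟩
  exact ⟨n, hn, hocc.imp (fun h2 => h2.trans happ) (fun h2 => h2.trans happ)⟩

lemma pvP_concat_o (p : List Char) (k : Int) :
    pvP (p ++ ['o']) k ↔ pvP p k ∨ (pvDashBefore p = true ∧ k = (pvTrailO p : Int) + 1) := by
  constructor
  · rintro ⟨n, rfl, hocc | hocc⟩
    · rcases List.infix_concat_iff.mp hocc with hs | hi
      · rw [pvPat1Concat, pvSuffixConcat] at hs
        obtain ⟨hd, hn⟩ := pvL4 p n hs.2
        right; exact ⟨hd, by omega⟩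
      · left; exact ⟨n, rfl, Or.inl hi⟩
    · rcases List.infix_concat_iff.mp hocc with hs | hi
      · rw [pvSuffixConcat] at hs
        exact absurd hs.1 (by decide)
      · left; exact ⟨n, rfl, Or.inr hi⟩
  · rintro (hp | ⟨hd, rfl⟩)
    · exact pvPMono _ _ _ hp
    · refine ⟨pvTrailO p, rfl, Or.inl ?_⟩
      have h1 := pvL1 p hd
      have h2 : (('-' :: List.replicate (pvTrailO p) 'o') ++ ['o']) <:+ (p ++ ['o']) :=
        (pvSuffixConcat _ _ _ _).mpr ⟨rfl, h1⟩
      rw [← pvPat1Concat] at h2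
      exact h2.isInfix

lemma pvP_concat_ne (p : List Char) (c : Char) (hc : c ≠ 'o') (k : Int) :
    pvP (p ++ [c]) k ↔ pvP p k ∨ (c = '-' ∧ ∃ n : Nat, k = (n : Int) + 1 ∧ n + 1 ≤ pvTrailO p) := by
  constructor
  · rintro ⟨n, rfl, hocc | hocc⟩
    · rcases List.infix_concat_iff.mp hocc with hs | hi
      · rw [pvPat1Concat, pvSuffixConcat] at hs
        exact absurd hs.1.symm hc
      · left; exact ⟨n, rfl, Or.inl hi⟩
    · rcases List.infix_concat_iff.mp hocc with hs | hi
      · rw [pvSuffixConcat] at hs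
        refine Or.inr ⟨hs.1.symm, n, rfl, pvL3 p (n + 1) hs.2⟩
      · left; exact ⟨n, rfl, Or.inr hi⟩
  · rintro (hp | ⟨rfl, n, rfl, hn⟩)
    · exact pvPMono _ _ _ hp
    · refine ⟨n, rfl, Or.inr ?_⟩
      have hrep : List.replicate (n + 1) 'o' <:+ List.replicate (pvTrailO p) 'o' :=
        ⟨List.replicate (pvTrailO p - (n + 1)) 'o', by rw [← List.replicate_add]; congr 1; omega⟩
      have h2 : List.replicate (n + 1) 'o' <:+ p := hrep.trans (pvL2 p)
      have h3 : ((List.replicate (n + 1) 'o') ++ ['-']) <:+ (p ++ ['-']) :=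
        (pvSuffixConcat _ _ _ _).mpr ⟨rfl, h2⟩
      exact h3.isInfix

lemma pvStep (p : List Char) (st : Int × Int × Bool) (c : Char) (h : pvInv p st) :
    pvInv (p ++ [c]) (pvScanStep st c) := by
  obtain ⟨best, run, dash⟩ := st
  obtain ⟨h1, h2, h3, h4, hg0, hgs, hgc⟩ := h
  dsimp only at h1 h2 h3 h4
  have hrun0 : 0 ≤ run := by rw [h1]; exact Int.natCast_nonneg _
  by_cases hc : c = 'o'
  · subst hc
    have hstep : pvScanStep (best, run, dash) 'o' = (best, run + 1, dash) := by
      simp [pvScanStep]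
    rw [hstep]
    have e1 := pvTrailO_concat_o p
    have e2 := pvDashBefore_concat_o p
    have hfin' : pvFin (best, run + 1, dash) = if dash = true then max best (run + 1) else best := by
      show (if dash = true ∧ 0 < run + 1 then max best (run + 1) else best) = _
      by_cases hd : dash = true
      · rw [if_pos ⟨hd, by omega⟩, if_pos hd]
      · rw [if_neg (fun hcon => hd hcon.1), if_neg hd]
    have hfinold : pvFin (best, run, dash) ≤ if dash = true then max best (run + 1) else best := by
      show (if dash = true ∧ 0 < run then max best run else best) ≤ _
      by_cases hd : dash = true
      · by_cases hr : 0 < run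
        · rw [if_pos ⟨hd, hr⟩, if_pos hd]
          exact max_le_max le_rfl (by omega)
        · rw [if_neg (fun hcon => hr hcon.2), if_pos hd]
          exact le_max_left _ _
      · rw [if_neg (fun hcon => hd hcon.1), if_neg hd]
    refine ⟨?_, ?_, h3, fun hb => pvPMono _ _ _ (h4 hb), ?_, ?_, ?_⟩
    · show run + 1 = ((pvTrailO (p ++ ['o']) : Nat) : Int)
      rw [e1]; push_cast; omega
    · show dash = pvDashBefore (p ++ ['o'])
      rw [e2]; exact h2
    · show 0 ≤ pvFin (best, run + 1, dash)
      rw [hfin']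
      split_ifs
      · exact le_trans h3 (le_max_left _ _)
      · exact h3
    · show 0 < pvFin (best, run + 1, dash) → pvP (p ++ ['o']) (pvFin (best, run + 1, dash))
      rw [hfin']
      split_ifs with hd
      · intro hpos
        rcases le_total (run + 1) best with hm | hm
        · rw [max_eq_left hm] at *
          exact pvPMono _ _ _ (h4 (by omega))
        · rw [max_eq_right hm] at *
          exact (pvP_concat_o p _).mpr (Or.inr ⟨h2 ▸ hd, by rw [h1]⟩)
      · intro hpos
        exact pvPMono _ _ _ (h4 hpos)
    · intro k hk
      rw [hfin']
      rcases (pvP_concat_o p k).mp hk with hk' | ⟨hdb, rfl⟩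
      · exact le_trans (hgc k hk') hfinold
      · have hd : dash = true := by rw [h2, hdb]
        rw [if_pos hd]
        refine le_max_of_le_right ?_
        rw [h1]
  · have hstep : pvScanStep (best, run, dash) c =
        (if (c = '-' ∨ dash = true) ∧ 0 < run then max best run else best, 0, c == '-') := by
      simp [pvScanStep, hc]
    rw [hstep]
    have e1 := pvTrailO_concat_ne p c hc
    have e2 := pvDashBefore_concat_ne p c hc
    have hb0 : 0 ≤ (if (c = '-' ∨ dash = true) ∧ 0 < run then max best run else best) := by
      split_ifs
      · exact le_trans h3 (le_max_left _ _)
      · exact h3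
    have hbs : 0 < (if (c = '-' ∨ dash = true) ∧ 0 < run then max best run else best) →
        pvP (p ++ [c]) (if (c = '-' ∨ dash = true) ∧ 0 < run then max best run else best) := by
      split_ifs with hg
      · obtain ⟨hcd, hr⟩ := hg
        rcases le_total run best with hm | hm
        · rw [max_eq_left hm]
          intro hb
          exact pvPMono _ _ _ (h4 hb)
        · rw [max_eq_right hm]
          intro _
          have htr : 1 ≤ pvTrailO p := by
            have h5 : (0 : Int) < ((pvTrailO p : Nat) : Int) := by rw [← h1]; exact hr
            exact_mod_cast h5
          have hrepl : List.replicate (pvTrailO p - 1 + 1) 'o' = List.replicate (pvTrailO p) 'o' := by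
            congr 1; omega
          rcases hcd with hcd | hcd
          · subst hcd
            refine ⟨pvTrailO p - 1, by rw [h1]; omega, Or.inr ?_⟩
            have h3' : ((List.replicate (pvTrailO p) 'o') ++ ['-']) <:+ (p ++ ['-']) :=
              (pvSuffixConcat _ _ _ _).mpr ⟨rfl, pvL2 p⟩
            rw [hrepl]; exact h3'.isInfix
          · have hdb : pvDashBefore p = true := by rw [← h2]; exact hcd
            apply pvPMono
            refine ⟨pvTrailO p - 1, by rw [h1]; omega, Or.inl ?_⟩
            rw [hrepl]; exact (pvL1 p hdb).isInfix
      · intro hb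
        exact pvPMono _ _ _ (h4 hb)
    have hfin' : pvFin
        (if (c = '-' ∨ dash = true) ∧ 0 < run then max best run else best, 0, c == '-') =
        (if (c = '-' ∨ dash = true) ∧ 0 < run then max best run else best) := by
      show (if (c == '-') = true ∧ (0 : Int) < 0 then _ else _) = _
      rw [if_neg (fun hcon => by exact absurd hcon.2 (by omega))]
    refine ⟨?_, ?_, hb0, hbs, ?_, ?_, ?_⟩
    · show (0 : Int) = ((pvTrailO (p ++ [c]) : Nat) : Int)
      rw [e1]; simp
    · show (c == '-') = pvDashBefore (p ++ [c])
      rw [e2]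
    · rw [hfin']; exact hb0
    · rw [hfin']; exact hbs
    · intro k hk
      rw [hfin']
      rcases (pvP_concat_ne p c hc k).mp hk with hk' | ⟨hcd, n, rfl, hn⟩
      · refine le_trans (hgc k hk') ?_
        show (if dash = true ∧ 0 < run then max best run else best) ≤ _
        by_cases hold : dash = true ∧ 0 < run
        · rw [if_pos hold, if_pos ⟨Or.inr hold.1, hold.2⟩]
        · rw [if_neg hold]
          split_ifs
          · exact le_max_left _ _
          · exact le_rfl
      · have hcast : ((n : Int) + 1) ≤ ((pvTrailO p : Nat) : Int) := by exact_mod_cast hn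
        have hr : 0 < run := by rw [h1]; omega
        rw [if_pos ⟨Or.inl hcd, hr⟩]
        refine le_max_of_le_right ?_
        rw [h1]; omega

lemma pvScanFold (r : List Char) : ∀ (p : List Char) (st : Int × Int × Bool),
    pvInv p st → pvInv (p ++ r) (r.foldl pvScanStep st) := by
  induction r with
  | nil => intro p st h; simpa using h
  | cons c r ih =>
    intro p st h
    have := ih (p ++ [c]) (pvScanStep st c) (pvStep p st c h)
    simpa [List.append_assoc] using this

lemma pvInvNil : pvInv [] (0, 0, false) := by
  refine ⟨by simp [pvTrailO, pvLeadO], by simp [pvDashBefore, pvDashAfter], le_refl 0, by omega, ?_⟩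
  refine ⟨by simp [pvFin], by simp [pvFin], ?_⟩
  intro k hk
  obtain ⟨n, hn, hocc⟩ := hk
  rcases hocc with h2 | h2 <;> simp [List.replicate_succ] at h2

lemma pvBGood (l : List Char) : pvGood l (pvFin (l.foldl pvScanStep (0, 0, false))) := by
  have := pvScanFold l [] (0, 0, false) pvInvNil
  simpa using this.2.2.2.2

-- ===== VERDICT (by name: the statement is the Claim_ definition above) =====
theorem max_dango_level_spec : Claim_equal_max_dango_level := by
  intro S _
  unfold Spec_max_dango_level
  have heq := pvGood_unique S.toList _ _ (pvAGood S.toList) (pvBGood S.toList)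
  show max_dango_level S = max_dango_level_alt S
  simp only [max_dango_level, max_dango_level_alt, pvFin] at heq ⊢
  rw [heq]
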